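-- pv_equiv track=rewrite | github.com/Chelovecki/ege_bk | exams/sdamgia/benjamin 2024-04-21 15492934/05 16882.py | f
-- ===== SOURCE A (Python) =====
-- def f(n):
--     b = bin(n)[2:].zfill(8)
--     new_b = ''
--     for r in b:
--         if r == '1':
--             new_b += '0'
--         else:
--             new_b += '1'
--     return int(new_b, 2) - n
-- ===== SOURCE B (Python) =====
-- def f(n):
--     L = max(8, n.bit_length())
--     return (1 << L) - 1 - 2 * n
-- ===== Notes on version B (the rewrite author's own statement) =====
-- stated objective: simpler
-- what changed: Replaces the bin()/zfill string round-trip and the per-character inversion loop with a single closed-form arithmetic expression built from the bit width.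
-- intended difference: For negative n, A parses the stray letter b kept by slicing bin(n) as an inverted bit and so always returns the all-ones value of the padded width, an accident of string slicing; B returns the closed-form inverted-bits-minus-n value, which is the intended meaning. — e.g. on f(-1): A returns 255, B returns 257
import Mathlib
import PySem

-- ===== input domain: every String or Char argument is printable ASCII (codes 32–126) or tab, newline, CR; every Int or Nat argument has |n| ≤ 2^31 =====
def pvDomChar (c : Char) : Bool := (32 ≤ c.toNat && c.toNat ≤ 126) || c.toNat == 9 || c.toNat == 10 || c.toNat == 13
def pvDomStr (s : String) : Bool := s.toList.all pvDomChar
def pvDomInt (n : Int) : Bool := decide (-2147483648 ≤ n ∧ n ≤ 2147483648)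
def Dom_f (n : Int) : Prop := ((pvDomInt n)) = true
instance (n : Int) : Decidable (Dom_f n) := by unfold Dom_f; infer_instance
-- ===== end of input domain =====

-- B replaces A's bin()/zfill string round-trip and per-character inversion loop
-- with a single closed-form arithmetic expression from the bit width (objective: simpler).


-- ===== PORT A =====
-- binary digits of a natural number, most significant first (bin(m) for m > 0);
-- the first argument is fuel making the halving recursion structural (exact for fuel ≥ m)
def binDigitsF : Nat → Nat → List Char
  | _, 0 => []
  | 0, _ + 1 => []
  | fuel + 1, m + 1 =>
      binDigitsF fuel ((m + 1) / 2) ++ [if (m + 1) % 2 = 1 then '1' else '0']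

def binDigits (m : Nat) : List Char := binDigitsF m m

-- bin(n)[2:] — for n < 0 the slice keeps the 'b' of '-0b…'
def binTail (n : Int) : List Char :=
  if n < 0 then 'b' :: binDigits n.natAbs
  else if n = 0 then ['0'] else binDigits n.natAbs

-- s.zfill(8) (no leading sign can occur here)
def zfill8 (s : List Char) : List Char := List.replicate (8 - s.length) '0' ++ s

-- int(new_b, 2): new_b consists of '0'/'1' only, so this is Python's base-2 parse
def parseBin (s : List Char) : Int :=
  s.foldl (fun a c => 2 * a + (if c = '1' then 1 else 0)) 0

def f (n : Int) : Int :=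
  let b := zfill8 (binTail n)
  let new_b := b.foldl (fun acc r => acc ++ [if r = '1' then '0' else '1']) []
  parseBin new_b - n

-- ===== PORT B =====
-- n.bit_length() (of the absolute value, as in Python); fuel as above (exact for fuel ≥ m)
def bitLengthF : Nat → Nat → Nat
  | _, 0 => 0
  | 0, _ + 1 => 0
  | fuel + 1, m + 1 => bitLengthF fuel ((m + 1) / 2) + 1

def bitLength (m : Nat) : Nat := bitLengthF m m

def f_alt (n : Int) : Int :=
  let L := max 8 (bitLength n.natAbs)
  (2 : Int) ^ L - 1 - 2 * n

-- ===== PRECONDITION & SPEC =====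
-- For negative n, A parses the stray letter b kept by slicing bin(n) as an inverted bit
-- and so always returns the all-ones value of the padded width, an accident of string
-- slicing; B returns the closed-form inverted-bits-minus-n value, the intended meaning.
def D_f (n : Int) : Prop := n < 0
instance (n : Int) : Decidable (D_f n) := by unfold D_f; infer_instance

def Spec_f (n : Int) (out : Int) : Prop := ¬ D_f n → out = f_alt n
instance (n : Int) (out : Int) : Decidable (Spec_f n out) := by unfold Spec_f; infer_instance

def pvDiffWitness_f : Int := -1
def pvDiffWitnessOut_f : Int × Int := (255, 257)

-- ===== CLAIM (what is proved, stated in full; the proofs are below) =====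
def Claim_unchanged_f : Prop := ∀ (n : Int), Dom_f n → Spec_f n (f n)
def Claim_changed_f : Prop := Dom_f (pvDiffWitness_f) ∧ D_f (pvDiffWitness_f) ∧ f (pvDiffWitness_f) = pvDiffWitnessOut_f.1 ∧ f_alt (pvDiffWitness_f) = pvDiffWitnessOut_f.2 ∧ pvDiffWitnessOut_f.1 ≠ pvDiffWitnessOut_f.2

-- ===== LEMMAS AND PROOFS =====

theorem binDigitsF_irrel (f1 : Nat) : ∀ (f2 m : Nat), m ≤ f1 → m ≤ f2 →
    binDigitsF f1 m = binDigitsF f2 m := by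
  induction f1 with
  | zero =>
    intro f2 m h1 _
    interval_cases m
    cases f2 <;> rfl
  | succ f1 ih =>
    intro f2 m h1 h2
    match m, f2 with
    | 0, f2 => cases f2 <;> rfl
    | m + 1, f2 + 1 =>
      show binDigitsF f1 ((m + 1) / 2) ++ _ = binDigitsF f2 ((m + 1) / 2) ++ _
      rw [ih f2 ((m + 1) / 2) (by omega) (by omega)]

theorem binDigits_zero : binDigits 0 = [] := rfl

theorem binDigits_succ (m : Nat) :
    binDigits (m + 1)
      = binDigits ((m + 1) / 2) ++ [if (m + 1) % 2 = 1 then '1' else '0'] := by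
  show binDigitsF (m + 1) (m + 1) = binDigitsF ((m + 1) / 2) ((m + 1) / 2) ++ _
  show binDigitsF m ((m + 1) / 2) ++ _ = _
  rw [binDigitsF_irrel m ((m + 1) / 2) ((m + 1) / 2) (by omega) (le_refl _)]

theorem bitLengthF_irrel (f1 : Nat) : ∀ (f2 m : Nat), m ≤ f1 → m ≤ f2 →
    bitLengthF f1 m = bitLengthF f2 m := by
  induction f1 with
  | zero =>
    intro f2 m h1 _
    interval_cases m
    cases f2 <;> rfl
  | succ f1 ih =>
    intro f2 m h1 h2
    match m, f2 with
    | 0, f2 => cases f2 <;> rfl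
    | m + 1, f2 + 1 =>
      show bitLengthF f1 ((m + 1) / 2) + 1 = bitLengthF f2 ((m + 1) / 2) + 1
      rw [ih f2 ((m + 1) / 2) (by omega) (by omega)]

theorem bitLength_succ (m : Nat) :
    bitLength (m + 1) = bitLength ((m + 1) / 2) + 1 := by
  show bitLengthF m ((m + 1) / 2) + 1 = bitLengthF ((m + 1) / 2) ((m + 1) / 2) + 1
  rw [bitLengthF_irrel m ((m + 1) / 2) ((m + 1) / 2) (by omega) (le_refl _)]

theorem foldl_app_map (g : Char → Char) (init : List Char) (bs : List Char) :
    bs.foldl (fun acc r => acc ++ [g r]) init = init ++ bs.map g := by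
  induction bs generalizing init with
  | nil => simp
  | cons c cs ih => simp [List.foldl, ih]

theorem parse_acc (a : Int) (bs : List Char) :
    bs.foldl (fun a c => 2 * a + (if c = '1' then 1 else 0)) a
      = a * 2 ^ bs.length + parseBin bs := by
  induction bs generalizing a with
  | nil => simp [parseBin]
  | cons c cs ih =>
    simp only [List.foldl, parseBin] at *
    rw [ih, ih (2 * 0 + _)]
    simp only [List.length_cons, pow_succ]
    ring

theorem parseBin_cons (c : Char) (bs : List Char) :
    parseBin (c :: bs) = (if c = '1' then 1 else 0) * 2 ^ bs.length + parseBin bs := by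
  show List.foldl _ (2 * 0 + (if c = '1' then 1 else 0)) bs = _
  rw [parse_acc]
  have : (2 * (0 : Int) + (if c = '1' then 1 else 0)) = (if c = '1' then 1 else 0) := by
    ring
  rw [this]

theorem parseBin_append_singleton (bs : List Char) (c : Char) :
    parseBin (bs ++ [c]) = 2 * parseBin bs + (if c = '1' then 1 else 0) := by
  simp only [parseBin, List.foldl_append, List.foldl]

theorem parseBin_map_inv (bs : List Char) (hb : ∀ c ∈ bs, c = '0' ∨ c = '1') :
    parseBin (bs.map (fun r => if r = '1' then '0' else '1'))
      = 2 ^ bs.length - 1 - parseBin bs := by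
  induction bs with
  | nil => simp [parseBin]
  | cons c cs ih =>
    have hc := hb c (by simp)
    have hcs : ∀ x ∈ cs, x = '0' ∨ x = '1' := fun x hx => hb x (by simp [hx])
    simp only [List.map_cons, parseBin_cons, List.length_map, ih hcs, List.length_cons]
    rcases hc with h | h <;> subst h <;> simp <;> rw [pow_succ] <;> ring

theorem parseBin_replicate_zero_append (k : Nat) (bs : List Char) :
    parseBin (List.replicate k '0' ++ bs) = parseBin bs := by
  induction k with
  | zero => simp
  | succ k ih => simpa [List.replicate_succ, parseBin, List.foldl] using ih

theorem binDigits_binary (m : Nat) : ∀ c ∈ binDigits m, c = '0' ∨ c = '1' := by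
  induction m using Nat.strong_induction_on with
  | _ m ih =>
    match m with
    | 0 => simp [binDigits_zero]
    | m + 1 =>
      intro c hc
      rw [binDigits_succ] at hc
      rcases List.mem_append.mp hc with h | h
      · exact ih ((m + 1) / 2) (by omega) c h
      · simp at h; subst h; split_ifs <;> simp

theorem binDigits_parse (m : Nat) : parseBin (binDigits m) = (m : Int) := by
  induction m using Nat.strong_induction_on with
  | _ m ih =>
    match m with
    | 0 => simp [binDigits_zero, parseBin]
    | m + 1 =>
      rw [binDigits_succ, parseBin_append_singleton, ih ((m + 1) / 2) (by omega)]
      have h2 : ((m + 1) % 2 = 1) ∨ ((m + 1) % 2 = 0) := by omega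
      have := Nat.div_add_mod (m + 1) 2
      rcases h2 with h | h <;> simp [h] <;> omega

theorem binDigits_length (m : Nat) : (binDigits m).length = bitLength m := by
  induction m using Nat.strong_induction_on with
  | _ m ih =>
    match m with
    | 0 => rfl
    | m + 1 =>
      rw [binDigits_succ, bitLength_succ, List.length_append,
        ih ((m + 1) / 2) (by omega)]
      rfl

theorem binTail_parse_nonneg (n : Int) (hn : 0 ≤ n) : parseBin (binTail n) = n := by
  rw [binTail]
  rcases lt_or_eq_of_le hn with h | h
  · simp only [if_neg (not_lt.mpr hn), if_neg (by omega : ¬ n = 0)]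
    rw [binDigits_parse]; omega
  · simp [← h, parseBin]

theorem binTail_binary_nonneg (n : Int) (hn : 0 ≤ n) :
    ∀ c ∈ binTail n, c = '0' ∨ c = '1' := by
  rw [binTail]
  rcases lt_or_eq_of_le hn with h | h
  · simp only [if_neg (not_lt.mpr hn), if_neg (by omega : ¬ n = 0)]
    exact binDigits_binary n.natAbs
  · simp [← h]

theorem binTail_length_nonneg (n : Int) (hn : 0 ≤ n) :
    max 8 (binTail n).length = max 8 (bitLength n.natAbs) := by
  rw [binTail]
  rcases lt_or_eq_of_le hn with h | h
  · simp [if_neg (not_lt.mpr hn), if_neg (by omega : ¬ n = 0), binDigits_length]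
  · rw [← h]; decide

-- parse of the inverted zfilled string, in closed form
theorem parse_inverted (n : Int) (hn : 0 ≤ n) :
    parseBin ((zfill8 (binTail n)).foldl
        (fun acc r => acc ++ [if r = '1' then '0' else '1']) [])
      = 2 ^ (max 8 (bitLength n.natAbs)) - 1 - n := by
  set s := binTail n with hs
  rw [foldl_app_map, List.nil_append]
  have hball : ∀ c ∈ zfill8 s, c = '0' ∨ c = '1' := by
    intro c hc
    rcases List.mem_append.mp hc with h | h
    · left; exact List.eq_of_mem_replicate h
    · exact binTail_binary_nonneg n hn c h
  rw [parseBin_map_inv _ hball]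
  have hlen : (zfill8 s).length = max 8 s.length := by
    simp [zfill8]; omega
  rw [hlen]
  have hval : parseBin (zfill8 s) = n := by
    rw [zfill8, parseBin_replicate_zero_append, hs, binTail_parse_nonneg n hn]
  rw [hval, ← binTail_length_nonneg n hn]

-- ===== VERDICT (by name: the statement is the Claim_ definition above) =====
theorem f_spec : Claim_unchanged_f := by
  intro n _ hnd
  have hn : 0 ≤ n := by
    unfold D_f at hnd; omega
  show f n = f_alt n
  simp only [f, f_alt]
  rw [parse_inverted n hn]
  ring

theorem f_changed : Claim_changed_f := by
  unfold Claim_changed_f; decide
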